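-- pv_equiv track=rewrite | github.com/tanchangsheng/publicpolicy_sentiment_analysis | src/features/features_extractor.py | extract_lsd_words
-- ===== SOURCE A (Python) =====
-- from collections import Counter
--
-- def extract_lsd_words(row, lsd_words):
--     '''
--     Analyze emotion words
--     Args
--     row: A row of data.
--     lsd_words: dictionary of dictionary of political sentiment words
-- 	'''
--     lsd_feat = dict()
--     if row and len(row.strip()) > 0:
--         # row = row.lower()
--         # row = re.sub(r'[0-9!@#$%^&*+=()\[\]\?<>/\\-_\.,;:"\']', ' ', row)
--         counts = []
--
--         for k, v in lsd_words.items():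
--
--             for k2, v2 in v.items():
--                 matched = [i for i in row.split() if i in v2]
--
--                 sent = dict()
--                 sent['type'] = k + "_" + k2
--                 sent['words'] = [i[0] for i in Counter(matched).most_common()]
--                 sent['counts'] = [i[1] for i in Counter(matched).most_common()]
--                 if len(matched) > 0:
--                     counts.append(sent)
--
--         for c in counts:
--             # e.g. {"positive_help":2}
--             for i, w in enumerate(c['words']):
--                 lsd_feat['lsd_' + c['type'] + '_' + w] = c['counts'][i]
--         return lsd_feat
-- ===== SOURCE B (Python) =====
-- from collections import Counter
--
-- def extract_lsd_words(row, lsd_words):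
--     '''Same result as A: one global word-frequency table and a single pass,
--     instead of per-category Counter/most_common and a second record-building pass.'''
--     if not (row and len(row.strip()) > 0):
--         return None
--     words = row.split()
--     wc = Counter(words)                      # word -> occurrences in the row
--     order = list(dict.fromkeys(words))       # distinct row words, first-occurrence order
--     feat = {}
--     for k, v in lsd_words.items():
--         for k2, v2 in v.items():
--             cand = [w for w in order if w in v2]
--             cand.sort(key=lambda w: -wc[w])  # stable: count desc, ties in row order
--             for w in cand:
--                 feat['lsd_' + k + '_' + k2 + '_' + w] = wc[w]
--     return feat
-- ===== Notes on version B (the rewrite author's own statement) =====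
-- stated objective: faster
-- what changed: One Counter over the row's words and an ordered-dedup word list are built once, replacing A's per-category row re-scan (filter of row.split), per-category Counter/most_common and the separate second record-building pass; features are inserted directly in a single pass over the lexicon. Pre_ excludes association lists with duplicate outer or inner keys, which cannot encode a Python dict argument.
import Mathlib
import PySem

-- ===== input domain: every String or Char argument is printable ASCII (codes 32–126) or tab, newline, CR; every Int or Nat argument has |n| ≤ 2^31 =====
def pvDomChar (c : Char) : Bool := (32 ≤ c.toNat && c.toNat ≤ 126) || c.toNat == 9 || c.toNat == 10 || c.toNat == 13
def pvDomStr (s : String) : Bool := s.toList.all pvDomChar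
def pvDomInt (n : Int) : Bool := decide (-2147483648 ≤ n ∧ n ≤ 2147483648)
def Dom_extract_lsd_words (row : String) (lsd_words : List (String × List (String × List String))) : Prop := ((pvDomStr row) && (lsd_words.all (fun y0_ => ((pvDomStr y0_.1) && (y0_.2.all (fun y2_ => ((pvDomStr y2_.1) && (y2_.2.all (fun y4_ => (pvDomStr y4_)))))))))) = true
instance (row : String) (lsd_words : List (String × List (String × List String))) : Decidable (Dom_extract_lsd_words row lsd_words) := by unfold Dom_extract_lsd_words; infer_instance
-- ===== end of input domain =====

-- B replaces A's per-category Counter/most_common and second record-building pass by one global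
-- word-frequency table, an ordered-dedup word list and a single direct-insertion pass.
-- ===== PORT A =====
def extract_lsd_words (row : String) (lsd_words : List (String × List (String × List String))) : Option (List (String × Int)) :=
  if row ≠ "" ∧ 0 < PySem.Str.len (PySem.Str.strip row) then
    -- counts: list of 'sent' records (type, words, counts) — sent has the fixed keys 'type'/'words'/'counts', ported as a triple
    let counts : List (String × List String × List Int) :=
      lsd_words.foldl (fun counts kv =>
        kv.2.foldl (fun counts kv2 =>
          let matched := (PySem.Str.split₀ row).filter (fun i => kv2.2.contains i)
          -- Counter(matched).most_common() = sorted(Counter(matched).items(), key=itemgetter(1), reverse=True)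
          let mc := PySem.List.sorted (PySem.Dict.counter matched).items (fun p => p.2) true
          let sent : String × List String × List Int :=
            (kv.1 ++ "_" ++ kv2.1, mc.map (fun p => p.1), mc.map (fun p => p.2))
          if matched.length > 0 then counts ++ [sent] else counts) counts) []
    let feat : PySem.Dict String Int :=
      counts.foldl (fun d c =>
        (PySem.List.enumerate c.2.1).foldl (fun d iw =>
          -- c['counts'][i]: i is always in range (words and counts have equal length), so the default is never read
          d.insert ("lsd_" ++ c.1 ++ "_" ++ iw.2) (PySem.List.pyGetD c.2.2 iw.1 0)) d)
        PySem.Dict.empty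
    some feat.items
  else none

-- ===== PORT B =====
def extract_lsd_words_alt (row : String) (lsd_words : List (String × List (String × List String))) : Option (List (String × Int)) :=
  if ¬ (row ≠ "" ∧ 0 < PySem.Str.len (PySem.Str.strip row)) then none
  else
    let words := PySem.Str.split₀ row
    let wc := PySem.Dict.counter words                 -- word -> occurrences in the row
    let order := PySem.List.dedup words                -- distinct row words, first-occurrence order
    let feat : PySem.Dict String Int :=
      lsd_words.foldl (fun d kv =>
        kv.2.foldl (fun d kv2 =>
          let cand := order.filter (fun w => kv2.2.contains w)
          -- cand.sort(key=lambda w: -wc[w]) — stable: count desc, ties in row order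
          let cand := PySem.List.sorted cand (fun w => -(wc.getD w 0)) false
          cand.foldl (fun d w =>
            d.insert ("lsd_" ++ kv.1 ++ "_" ++ kv2.1 ++ "_" ++ w) (wc.getD w 0)) d) d)
        PySem.Dict.empty
    some feat.items


-- ===== PRECONDITION & SPEC =====
-- Pre_ excludes association lists carrying a duplicate outer or inner key: the Python arguments
-- are dicts, which cannot hold duplicate keys, so such lists do not encode any Python input.
def Pre_extract_lsd_words (row : String) (lsd_words : List (String × List (String × List String))) : Prop :=
  (lsd_words.map Prod.fst).Nodup ∧ ∀ kv ∈ lsd_words, (kv.2.map Prod.fst).Nodup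
instance (row : String) (lsd_words : List (String × List (String × List String))) : Decidable (Pre_extract_lsd_words row lsd_words) := by unfold Pre_extract_lsd_words; infer_instance
def pvWitness_extract_lsd_words : String × (List (String × List (String × List String))) :=
  ("go stop go", [("pos", [("strong", ["go", "yes"])]), ("neg", [("weak", ["stop"])])])

def Spec_extract_lsd_words (row : String) (lsd_words : List (String × List (String × List String))) (out : Option (List (String × Int))) : Prop := out = extract_lsd_words_alt row lsd_words
instance (row : String) (lsd_words : List (String × List (String × List String))) (out : Option (List (String × Int))) : Decidable (Spec_extract_lsd_words row lsd_words out) := by unfold Spec_extract_lsd_words; infer_instance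

-- ===== CLAIM (what is proved, stated in full; the proofs are below) =====
def Claim_equal_extract_lsd_words : Prop := ∀ (row : String) (lsd_words : List (String × List (String × List String))), Dom_extract_lsd_words row lsd_words → Pre_extract_lsd_words row lsd_words → Spec_extract_lsd_words row lsd_words (extract_lsd_words row lsd_words)

-- ===== LEMMAS AND PROOFS =====

-- set(filter) = filter(set): first-occurrence dedup commutes with filter (loop invariant form)
theorem pv_foldl_add_filter (p : String → Bool) (l : List String) (s : PySem.Set String) :
    (l.filter p).foldl PySem.Set.add (s.filter p) = (l.foldl PySem.Set.add s).filter p := by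
  induction l generalizing s with
  | nil => rfl
  | cons x xs ih =>
    by_cases hx : p x = true
    · have hadd : PySem.Set.add (s.filter p) x = (PySem.Set.add s x).filter p := by
        show (if (s.filter p).contains x then s.filter p else s.filter p ++ [x]) =
          (if s.contains x then s else s ++ [x]).filter p
        have hc : (s.filter p).contains x = s.contains x := by
          simp [List.mem_filter, hx]
        rw [hc]
        split
        · rfl
        · simp [List.filter_append, hx]
      simp only [List.filter_cons, hx, if_pos, List.foldl_cons]
      rw [hadd, ih]
    · simp only [List.filter_cons, hx]
      simp only [List.foldl_cons, Bool.false_eq_true, if_false]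
      have hadd : (PySem.Set.add s x).filter p = s.filter p := by
        show (if s.contains x then s else s ++ [x]).filter p = s.filter p
        split
        · rfl
        · simp [List.filter_append, hx]
      have h2 := ih (PySem.Set.add s x)
      rwa [hadd] at h2

theorem pv_ofList_filter (p : String → Bool) (l : List String) :
    PySem.Set.ofList (l.filter p) = (PySem.Set.ofList l).filter p := by
  have := pv_foldl_add_filter p l []
  simpa [PySem.Set.ofList_eq_foldl] using this

-- insertBy commutes with map
theorem pv_insertBy_map {α β : Type} (cmp : β → β → Bool) (f : α → β) (x : α) (l : List α) :
    PySem.List.insertBy cmp (f x) (l.map f) =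
      (PySem.List.insertBy (fun a b => cmp (f a) (f b)) x l).map f := by
  induction l with
  | nil => rfl
  | cons y ys ih =>
    simp only [List.map_cons, PySem.List.insertBy]
    split
    · simp
    · simp [ih]

-- reverse-sort of a mapped list, pulled through the map
theorem pv_sorted_true_map {α β : Type} (l : List α) (f : α → β) (key : β → Int) :
    PySem.List.sorted (l.map f) key true =
      (PySem.List.sorted l (fun a => key (f a)) true).map f := by
  rw [PySem.List.sorted_rev_eq_foldl_insertBy, PySem.List.sorted_rev_eq_foldl_insertBy,
    List.foldl_map]
  have gen : ∀ (acc : List α),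
      l.foldl (fun acc x => PySem.List.insertBy (fun a b => decide (key b < key a)) (f x) acc) (acc.map f)
        = (l.foldl (fun acc x => PySem.List.insertBy (fun a b => decide (key (f b) < key (f a))) x acc) acc).map f := by
    induction l with
    | nil => intro acc; rfl
    | cons y ys ih =>
      intro acc
      simp only [List.foldl_cons]
      rw [pv_insertBy_map, ih]
  simpa using gen []

-- the enumerate-and-index fold over the two projections of a pair list = direct fold over the pairs
theorem pv_enum_insert (key : String → String) (post pre : List (String × Int)) (d : PySem.Dict String Int) :
    (PySem.List.enumerate (post.map Prod.fst) (pre.length : Int)).foldl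
        (fun d iw => d.insert (key iw.2) (PySem.List.pyGetD ((pre ++ post).map Prod.snd) iw.1 0)) d
      = post.foldl (fun d x => d.insert (key x.1) x.2) d := by
  induction post generalizing pre d with
  | nil => simp [PySem.List.enumerate_nil]
  | cons c cs ih =>
    simp only [List.map_cons, PySem.List.enumerate_cons, List.foldl_cons]
    have hv : PySem.List.pyGetD ((pre ++ c :: cs).map Prod.snd) (pre.length : Int) 0 = c.2 := by
      rw [PySem.List.pyGetD_natCast]
      have : pre.length = (pre.map Prod.snd).length := by simp
      rw [List.map_append, List.map_cons, this, List.getD_eq_getElem?_getD,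
        List.getElem?_append_right (le_refl _)]
      simp
    rw [hv]
    have harr : pre ++ c :: cs = (pre ++ [c]) ++ cs := by simp
    have hlen : (pre.length : Int) + 1 = ((pre ++ [c]).length : Int) := by simp
    rw [harr, hlen, ih (pre ++ [c])]

-- the heart: A's per-category sent record inserted via enumerate/index = B's direct sorted-candidate insertion
theorem pv_cat (words : List String) (k k2 : String) (v2 : List String) (d : PySem.Dict String Int) :
    (if (words.filter (fun i => v2.contains i)).length > 0 then
       [( k ++ "_" ++ k2,
          (PySem.List.sorted (PySem.Dict.counter (words.filter (fun i => v2.contains i))).items (fun p => p.2) true).map (fun p => p.1),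
          (PySem.List.sorted (PySem.Dict.counter (words.filter (fun i => v2.contains i))).items (fun p => p.2) true).map (fun p => p.2))]
     else ([] : List (String × List String × List Int))).foldl
      (fun d c => (PySem.List.enumerate c.2.1 0).foldl (fun d iw => d.insert ("lsd_" ++ c.1 ++ "_" ++ iw.2) (PySem.List.pyGetD c.2.2 iw.1 0)) d) d
  = (PySem.List.sorted ((PySem.List.dedup words).filter (fun w => v2.contains w)) (fun w => -((PySem.Dict.counter words).getD w 0)) false).foldl
      (fun d w => d.insert ("lsd_" ++ k ++ "_" ++ k2 ++ "_" ++ w) ((PySem.Dict.counter words).getD w 0)) d := by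
  have hcand : (PySem.List.dedup words).filter (fun w => v2.contains w)
      = PySem.Set.ofList (words.filter (fun w => v2.contains w)) := by
    rw [PySem.List.dedup_eq_ofList, pv_ofList_filter]
  by_cases hm : (words.filter (fun i => v2.contains i)).length > 0
  · rw [if_pos hm]
    -- reduce the singleton fold
    simp only [List.foldl_cons, List.foldl_nil]
    -- A side: enumerate/index fold to direct pair fold
    have henum := pv_enum_insert (fun w => "lsd_" ++ (k ++ "_" ++ k2) ++ "_" ++ w)
      (PySem.List.sorted (PySem.Dict.counter (words.filter (fun i => v2.contains i))).items (fun p => p.2) true) [] d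
    simp only [List.length_nil, Nat.cast_zero, List.nil_append] at henum
    rw [henum]
    -- characterize mc
    have hmc : PySem.List.sorted (PySem.Dict.counter (words.filter (fun i => v2.contains i))).items (fun p => p.2) true
        = (PySem.List.sorted ((PySem.List.dedup words).filter (fun w => v2.contains w)) (fun w => ((words.count w : Int))) true).map (fun w => (w, (words.count w : Int))) := by
      rw [PySem.Dict.items_counter, ← hcand]
      have hmapc : ((PySem.List.dedup words).filter (fun w => v2.contains w)).map (fun w => (w, ((words.filter (fun i => v2.contains i)).count w : Int)))
          = ((PySem.List.dedup words).filter (fun w => v2.contains w)).map (fun w => (w, (words.count w : Int))) := by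
        apply List.map_congr_left
        intro w hw
        have hpw : v2.contains w = true := (List.mem_filter.mp hw).2
        rw [List.count_filter hpw]
      rw [hmapc, pv_sorted_true_map]
    rw [hmc, List.foldl_map]
    -- B side: rewrite count key, flip sort direction
    have hkey : (fun w => -((PySem.Dict.counter words).getD w 0)) = (fun w : String => -((words.count w : Int))) := by
      funext w; rw [PySem.Dict.getD_counter]
    rw [hkey]
    have hflip : PySem.List.sorted ((PySem.List.dedup words).filter (fun w => v2.contains w)) (fun w => ((words.count w : Int))) true
        = PySem.List.sorted ((PySem.List.dedup words).filter (fun w => v2.contains w)) (fun w => -((words.count w : Int))) false := by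
      rw [PySem.List.sorted_rev_eq_foldl_insertBy, PySem.List.sorted_eq_foldl_insertBy]
      congr 1
      funext acc x
      congr 1
      funext a b
      simp
    rw [← hflip]
    congr 1
    funext d w
    rw [PySem.Dict.getD_counter]
    simp [String.append_assoc]
  · rw [if_neg hm]
    simp only [List.foldl_nil]
    have : (words.filter (fun i => v2.contains i)) = [] := by
      simpa using hm
    rw [hcand, this]
    rfl

-- A = B outright (the precondition is not needed for the port-level equality)
theorem pv_main (row : String) (lsd_words : List (String × List (String × List String))) :
    extract_lsd_words row lsd_words = extract_lsd_words_alt row lsd_words := by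
  by_cases h : row ≠ "" ∧ 0 < PySem.Str.len (PySem.Str.strip row)
  · rw [extract_lsd_words, extract_lsd_words_alt, if_pos h, if_neg (not_not_intro h)]
    -- counts as a flatMap
    set words := PySem.Str.split₀ row with hw
    have hcounts : ∀ (acc : List (String × List String × List Int)),
        lsd_words.foldl (fun counts kv =>
          kv.2.foldl (fun counts kv2 =>
            if ((words.filter (fun i => kv2.2.contains i)).length > 0) then
              counts ++ [(kv.1 ++ "_" ++ kv2.1,
                (PySem.List.sorted (PySem.Dict.counter (words.filter (fun i => kv2.2.contains i))).items (fun p => p.2) true).map (fun p => p.1),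
                (PySem.List.sorted (PySem.Dict.counter (words.filter (fun i => kv2.2.contains i))).items (fun p => p.2) true).map (fun p => p.2))]
            else counts) counts) acc
        = acc ++ lsd_words.flatMap (fun kv => kv.2.flatMap (fun kv2 =>
            if ((words.filter (fun i => kv2.2.contains i)).length > 0) then
              [(kv.1 ++ "_" ++ kv2.1,
                (PySem.List.sorted (PySem.Dict.counter (words.filter (fun i => kv2.2.contains i))).items (fun p => p.2) true).map (fun p => p.1),
                (PySem.List.sorted (PySem.Dict.counter (words.filter (fun i => kv2.2.contains i))).items (fun p => p.2) true).map (fun p => p.2))]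
            else [])) := by
      intro acc
      have hinner : ∀ (kv : String × List (String × List String)) (acc2 : List (String × List String × List Int)),
          kv.2.foldl (fun counts kv2 =>
            if ((words.filter (fun i => kv2.2.contains i)).length > 0) then
              counts ++ [(kv.1 ++ "_" ++ kv2.1,
                (PySem.List.sorted (PySem.Dict.counter (words.filter (fun i => kv2.2.contains i))).items (fun p => p.2) true).map (fun p => p.1),
                (PySem.List.sorted (PySem.Dict.counter (words.filter (fun i => kv2.2.contains i))).items (fun p => p.2) true).map (fun p => p.2))]
            else counts) acc2
          = acc2 ++ kv.2.flatMap (fun kv2 =>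
            if ((words.filter (fun i => kv2.2.contains i)).length > 0) then
              [(kv.1 ++ "_" ++ kv2.1,
                (PySem.List.sorted (PySem.Dict.counter (words.filter (fun i => kv2.2.contains i))).items (fun p => p.2) true).map (fun p => p.1),
                (PySem.List.sorted (PySem.Dict.counter (words.filter (fun i => kv2.2.contains i))).items (fun p => p.2) true).map (fun p => p.2))]
            else []) := by
        intro kv acc2
        rw [← PySem.List.foldl_append_eq_flatMap]
        congr 1
        funext c kv2
        split <;> simp
      calc lsd_words.foldl _ acc = lsd_words.foldl (fun counts kv => counts ++ kv.2.flatMap (fun kv2 =>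
            if ((words.filter (fun i => kv2.2.contains i)).length > 0) then
              [(kv.1 ++ "_" ++ kv2.1,
                (PySem.List.sorted (PySem.Dict.counter (words.filter (fun i => kv2.2.contains i))).items (fun p => p.2) true).map (fun p => p.1),
                (PySem.List.sorted (PySem.Dict.counter (words.filter (fun i => kv2.2.contains i))).items (fun p => p.2) true).map (fun p => p.2))]
            else [])) acc := by
              apply PySem.List.foldl_congr_mem
              intro acc2 kv _
              exact hinner kv acc2
        _ = _ := by rw [PySem.List.foldl_append_eq_flatMap]
    rw [hcounts []]
    simp only [List.nil_append]
    rw [List.foldl_flatMap]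
    refine congrArg (fun d : PySem.Dict String Int => some d.items) ?_
    apply PySem.List.foldl_congr_mem
    intro d kv _
    rw [List.foldl_flatMap]
    apply PySem.List.foldl_congr_mem
    intro d2 kv2 _
    exact pv_cat words kv.1 kv2.1 kv2.2 d2
  · rw [extract_lsd_words, extract_lsd_words_alt, if_neg h, if_pos (by exact h)]

-- ===== VERDICT (by name: the statement is the Claim_ definition above) =====
theorem extract_lsd_words_spec : Claim_equal_extract_lsd_words := by
  intro row lsd_words _hdom _hpre
  unfold Spec_extract_lsd_words
  exact pv_main row lsd_words
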